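-- pv_equiv track=rewrite | github.com/forrestbicker/QuantcastTech | most_active_cookie.py | get_cookies
-- ===== SOURCE A (Python) =====
-- from typing import List
--
-- def get_cookies(lines: List[str], date: str) -> List[str]:
--     '''
--     given a list of `lines` containing cookie,timestamp pairs, and a `date` (as a string),
--     return the cookie that was most active on that date, or most active cookies in the case
--     of a tie.
--     '''
--     # iterate through log file and count the number of times each cookie appears
--     cookieCount = {}  # mapping from cookie to number of occurences
--     for line in lines:
--         cookie, timestamp = line.split(',')
--         if timestamp[:10] == date:  # only count cookies from the given date
--             if cookie not in cookieCount:
--                 cookieCount[cookie] = 0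
--
--             cookieCount[cookie] += 1
--
--     # print cookie with most occurences, including those tied for most occurences
--     # runs in in O(n) time and O(n) space
--     maxOccurences = max(cookieCount.values()) if cookieCount else 0
--     return [cookie for cookie in cookieCount if cookieCount[cookie] == maxOccurences]
-- ===== SOURCE B (Python) =====
-- from typing import List
--
-- def get_cookies(lines: List[str], date: str) -> List[str]:
--     # count occurrences per cookie on the given date
--     counts = {}
--     for line in lines:
--         cookie, timestamp = line.split(',')
--         if timestamp[:10] == date:
--             counts[cookie] = counts.get(cookie, 0) + 1
--     # invert: group cookies by their count (insertion order keeps first-appearance order)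
--     buckets = {}
--     for cookie, count in counts.items():
--         buckets.setdefault(count, []).append(cookie)
--     if not buckets:
--         return []
--     return buckets[max(buckets)]
-- ===== Notes on version B (the rewrite author's own statement) =====
-- stated objective: alternative
-- what changed: The extraction step is restructured: instead of scanning the count dict's values for the max and then filtering the keys by that count, B inverts the count dict into buckets keyed by count (preserving first-appearance order) and returns the bucket of the top count in one lookup; the counting loop also uses dict.get instead of a membership test plus two assignments.
import Mathlib
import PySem

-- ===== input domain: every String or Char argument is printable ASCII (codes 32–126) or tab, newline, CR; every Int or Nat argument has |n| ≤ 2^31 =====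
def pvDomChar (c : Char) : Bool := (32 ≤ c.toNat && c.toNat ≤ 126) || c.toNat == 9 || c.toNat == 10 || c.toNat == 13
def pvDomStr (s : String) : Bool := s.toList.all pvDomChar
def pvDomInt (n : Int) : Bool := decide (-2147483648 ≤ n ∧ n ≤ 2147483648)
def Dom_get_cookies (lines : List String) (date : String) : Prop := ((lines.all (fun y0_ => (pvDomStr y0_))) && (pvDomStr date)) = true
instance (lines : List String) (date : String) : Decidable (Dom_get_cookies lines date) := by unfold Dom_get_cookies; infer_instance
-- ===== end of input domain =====

-- B replaces A's "scan for max, then filter the keys" extraction by an inverted table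
-- grouping cookies by count and one lookup at the top count (objective: alternative).

-- ===== PORT A =====
def get_cookies (lines : List String) (date : String) : List String :=
  let cookieCount : PySem.Dict String Int :=
    lines.foldl (fun d line =>
      match PySem.Str.split? line "," with
      | some [cookie, timestamp] =>
        if PySem.Str.slice timestamp none (some 10) == date then
          let d := if d.contains cookie then d else d.insert cookie 0
          d.modify cookie 0 (· + 1)
        else d
      | _ => d)  -- Python raises ValueError here (unpacking); excluded by Pre_
      PySem.Dict.empty
  let maxOccurences : Int :=
    if cookieCount.items.isEmpty then 0
    else (PySem.List.max? cookieCount.values id).getD 0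
  cookieCount.keys.filter (fun cookie => cookieCount.getD cookie 0 == maxOccurences)

-- ===== PORT B =====
def get_cookies_alt (lines : List String) (date : String) : List String :=
  let counts : PySem.Dict String Int :=
    lines.foldl (fun d line =>
      let parts := (PySem.Str.split? line ",").getD []
      if parts.length == 2 then
        let cookie := parts.getD 0 ""
        let timestamp := parts.getD 1 ""
        if PySem.Str.slice timestamp none (some 10) == date then
          d.insert cookie (d.getD cookie 0 + 1)
        else d
      else d)  -- Python raises ValueError here (unpacking); excluded by Pre_
      PySem.Dict.empty
  let buckets : PySem.Dict Int (List String) :=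
    counts.items.foldl (fun b p => b.modify p.2 [] (· ++ [p.1])) PySem.Dict.empty
  if buckets.items.isEmpty then []
  else buckets.getD ((PySem.List.max? buckets.keys id).getD 0) []

-- ===== PRECONDITION & SPEC =====
-- Pre_ excludes exactly the lines without exactly one comma, on which A's tuple unpacking
-- of line.split(',') raises ValueError (B raises there too).
def Pre_get_cookies (lines : List String) (date : String) : Prop :=
  ∀ line ∈ lines, ((PySem.Str.split? line ",").getD []).length = 2
instance (lines : List String) (date : String) : Decidable (Pre_get_cookies lines date) := by unfold Pre_get_cookies; infer_instance
def pvWitness_get_cookies : List String × String :=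
  (["a,2020-01-01T00:00:00", "b,2020-01-01T01:00:00", "a,2020-01-02T00:00:00"], "2020-01-01")

def Spec_get_cookies (lines : List String) (date : String) (out : List String) : Prop := out = get_cookies_alt lines date
instance (lines : List String) (date : String) (out : List String) : Decidable (Spec_get_cookies lines date out) := by unfold Spec_get_cookies; infer_instance

-- ===== CLAIM (what is proved, stated in full; the proofs are below) =====
def Claim_equal_get_cookies : Prop := ∀ (lines : List String) (date : String), Dom_get_cookies lines date → Pre_get_cookies lines date → Spec_get_cookies lines date (get_cookies lines date)

-- ===== LEMMAS AND PROOFS =====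

-- the two counting loops build the same dict
lemma pv_step_eq (date : String) (d : PySem.Dict String Int) (line : String) :
    (match PySem.Str.split? line "," with
      | some [cookie, timestamp] =>
        if PySem.Str.slice timestamp none (some 10) == date then
          let d := if d.contains cookie then d else d.insert cookie 0
          d.modify cookie 0 (· + 1)
        else d
      | _ => d)
    = (let parts := (PySem.Str.split? line ",").getD []
      if parts.length == 2 then
        let cookie := parts.getD 0 ""
        let timestamp := parts.getD 1 ""
        if PySem.Str.slice timestamp none (some 10) == date then
          d.insert cookie (d.getD cookie 0 + 1)
        else d
      else d) := by
  cases h : PySem.Str.split? line "," with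
  | none => rfl
  | some l =>
    match l with
    | [] => rfl
    | [a] => rfl
    | a :: b :: c :: t3 => simp
    | [a, b] =>
        by_cases hdt : PySem.Str.slice b none (some 10) == date
        · by_cases hc : d.contains a = true
          · simp [hdt, hc, PySem.Dict.modify]
          · simp only [Bool.not_eq_true] at hc
            simp [hdt, hc, PySem.Dict.modify, PySem.Dict.getD_insert_self,
              PySem.Dict.insert_insert_self, PySem.Dict.getD_of_not_contains d 0 hc]
        · simp [hdt]

lemma pv_counts_eq (lines : List String) (date : String) :
    lines.foldl (fun d line =>
      match PySem.Str.split? line "," with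
      | some [cookie, timestamp] =>
        if PySem.Str.slice timestamp none (some 10) == date then
          let d := if d.contains cookie then d else d.insert cookie 0
          d.modify cookie 0 (· + 1)
        else d
      | _ => d) (PySem.Dict.empty : PySem.Dict String Int)
    = lines.foldl (fun d line =>
      let parts := (PySem.Str.split? line ",").getD []
      if parts.length == 2 then
        let cookie := parts.getD 0 ""
        let timestamp := parts.getD 1 ""
        if PySem.Str.slice timestamp none (some 10) == date then
          d.insert cookie (d.getD cookie 0 + 1)
        else d
      else d) (PySem.Dict.empty : PySem.Dict String Int) := by
  congr 1
  funext d line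
  exact pv_step_eq date d line

-- the counting loop keeps the keys Nodup
lemma pv_step_nodup (date : String) (d : PySem.Dict String Int) (line : String)
    (h : d.keys.Nodup) :
    ((let parts := (PySem.Str.split? line ",").getD []
      if parts.length == 2 then
        let cookie := parts.getD 0 ""
        let timestamp := parts.getD 1 ""
        if PySem.Str.slice timestamp none (some 10) == date then
          d.insert cookie (d.getD cookie 0 + 1)
        else d
      else d) : PySem.Dict String Int).keys.Nodup := by
  cases hs : PySem.Str.split? line "," with
  | none => simpa using h
  | some l =>
    match l with
    | [] => simpa using h
    | [a] => simpa using h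
    | a :: b :: c :: t3 => simpa using h
    | [a, b] =>
        by_cases hdt : PySem.Str.slice b none (some 10) == date
        · simpa [hdt] using PySem.Dict.nodup_keys_insert d a _ h
        · simpa [hdt] using h

lemma pv_counts_nodup (lines : List String) (date : String) :
    (lines.foldl (fun d line =>
      let parts := (PySem.Str.split? line ",").getD []
      if parts.length == 2 then
        let cookie := parts.getD 0 ""
        let timestamp := parts.getD 1 ""
        if PySem.Str.slice timestamp none (some 10) == date then
          d.insert cookie (d.getD cookie 0 + 1)
        else d
      else d) (PySem.Dict.empty : PySem.Dict String Int)).keys.Nodup := by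
  have : ∀ (d : PySem.Dict String Int), d.keys.Nodup →
      (lines.foldl (fun d line =>
        let parts := (PySem.Str.split? line ",").getD []
        if parts.length == 2 then
          let cookie := parts.getD 0 ""
          let timestamp := parts.getD 1 ""
          if PySem.Str.slice timestamp none (some 10) == date then
            d.insert cookie (d.getD cookie 0 + 1)
          else d
        else d) d).keys.Nodup := by
    induction lines with
    | nil => intro d h; exact h
    | cons l ls ih =>
      intro d h
      exact ih _ (pv_step_nodup date d l h)
  exact this PySem.Dict.empty (by simp [PySem.Dict.empty, PySem.Dict.keys])

-- value stored at a key of a Nodup-keys dict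
lemma pv_getD_of_mem_items (c : PySem.Dict String Int) (h : c.keys.Nodup)
    (p : String × Int) (hp : p ∈ c.items) : c.getD p.1 0 = p.2 := by
  rw [PySem.Dict.items_eq_map_keys c h 0] at hp
  obtain ⟨k, _, hk⟩ := List.mem_map.mp hp
  rw [← hk]

-- PySem.List.max? of a nonempty Int list is some
lemma pv_max?_cons_ne_none (a : Int) (l : List Int) :
    PySem.List.max? (a :: l) id ≠ none := by
  induction l generalizing a with
  | nil => simp [PySem.List.max?]
  | cons b t ih =>
    have hstep : PySem.List.max? (a :: b :: t) id
        = PySem.List.max? ((if id a < id b then b else a) :: t) id := by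
      by_cases hab : (a : Int) < b <;> simp [PySem.List.max?, hab]
    rw [hstep]
    exact ih _

-- max? over Int lists depends only on membership
lemma pv_max?_eq_of_mem_iff (xs ys : List Int) (h : ∀ z : Int, z ∈ xs ↔ z ∈ ys) :
    PySem.List.max? xs id = PySem.List.max? ys id := by
  cases hx : PySem.List.max? xs id with
  | none =>
    cases hy : PySem.List.max? ys id with
    | none => rfl
    | some m =>
      have hm : m ∈ xs := (h m).mpr (PySem.List.max?_mem hy)
      cases xs with
      | nil => simp at hm
      | cons a t => exact absurd hx (pv_max?_cons_ne_none a t)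
  | some m =>
    have hmy : m ∈ ys := (h m).mp (PySem.List.max?_mem hx)
    cases hy : PySem.List.max? ys id with
    | none =>
      cases ys with
      | nil => simp at hmy
      | cons a t => exact absurd hy (pv_max?_cons_ne_none a t)
    | some m' =>
      have h1 : m ≤ m' := by
        simpa using PySem.List.max?_isMax hy m hmy
      have h2 : m' ≤ m := by
        simpa using PySem.List.max?_isMax hx m' ((h m').mpr (PySem.List.max?_mem hy))
      simp [le_antisymm h1 h2]

-- the extraction steps agree on any count dict with Nodup keys
lemma pv_extract_eq (c : PySem.Dict String Int) (h : c.keys.Nodup) :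
    c.keys.filter (fun cookie => c.getD cookie 0 ==
      (if c.items.isEmpty then (0:Int) else (PySem.List.max? c.values id).getD 0))
    = (if (c.items.foldl (fun b p => b.modify p.2 [] (· ++ [p.1]))
            (PySem.Dict.empty : PySem.Dict Int (List String))).items.isEmpty then []
       else (c.items.foldl (fun b p => b.modify p.2 [] (· ++ [p.1]))
            (PySem.Dict.empty : PySem.Dict Int (List String))).getD
          ((PySem.List.max? (c.items.foldl (fun b p => b.modify p.2 [] (· ++ [p.1]))
            (PySem.Dict.empty : PySem.Dict Int (List String))).keys id).getD 0) []) := by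
  have hfold : c.items.foldl (fun b p => b.modify p.2 [] (· ++ [p.1]))
      (PySem.Dict.empty : PySem.Dict Int (List String))
      = (c.items.map (fun p => (p.2, p.1))).foldl
          (fun b q => b.modify q.1 [] (· ++ [q.2])) PySem.Dict.empty := by
    rw [List.foldl_map]
  have hkeys : (c.items.foldl (fun b p => b.modify p.2 [] (· ++ [p.1]))
      (PySem.Dict.empty : PySem.Dict Int (List String))).keys
      = PySem.Set.ofList (c.items.map (fun p => p.2)) := by
    rw [hfold,
      PySem.Dict.keys_foldl_modify_key (c.items.map (fun p => (p.2, p.1)))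
        (fun q => q.1) [] (fun _ q xs => xs ++ [q.2]) PySem.Dict.empty]
    rw [List.map_map]
    rfl
  cases hc : c.items with
  | nil =>
    have hk : c.keys = [] := by simp [PySem.Dict.keys, hc]
    simp [hk, PySem.Dict.empty]
  | cons q t =>
    -- counts nonempty: the top count M
    have hvne : c.values ≠ [] := by simp [PySem.Dict.values, hc]
    obtain ⟨M, hM⟩ : ∃ M, PySem.List.max? c.values id = some M := by
      cases hm : PySem.List.max? c.values id with
      | some M => exact ⟨_, rfl⟩
      | none =>
        rw [PySem.Dict.values, hc, List.map_cons] at hm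
        exact absurd hm (pv_max?_cons_ne_none _ _)
    have hmemiff : ∀ z : Int,
        z ∈ (c.items.foldl (fun b p => b.modify p.2 [] (· ++ [p.1]))
          (PySem.Dict.empty : PySem.Dict Int (List String))).keys ↔ z ∈ c.values := by
      intro z
      rw [hkeys, PySem.Set.mem_ofList]
      rfl
    have hMb : PySem.List.max?
        (c.items.foldl (fun b p => b.modify p.2 [] (· ++ [p.1]))
          (PySem.Dict.empty : PySem.Dict Int (List String))).keys id = some M := by
      rw [pv_max?_eq_of_mem_iff _ c.values hmemiff, hM]
    have hbne : ¬ (c.items.foldl (fun b p => b.modify p.2 [] (· ++ [p.1]))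
        (PySem.Dict.empty : PySem.Dict Int (List String))).items.isEmpty = true := by
      intro hemp
      have hknil : (c.items.foldl (fun b p => b.modify p.2 [] (· ++ [p.1]))
          (PySem.Dict.empty : PySem.Dict Int (List String))).keys = [] := by
        simp [PySem.Dict.keys, List.isEmpty_iff.mp hemp]
      exact absurd (PySem.List.max?_mem hMb) (by simp [hknil])
    have hgetD : (c.items.foldl (fun b p => b.modify p.2 [] (· ++ [p.1]))
        (PySem.Dict.empty : PySem.Dict Int (List String))).getD M []
        = (c.items.filter (fun p => p.2 == M)).map (fun p => p.1) := by
      rw [hfold, PySem.Dict.getD_foldl_modify_append]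
      simp [PySem.Dict.empty, PySem.Dict.getD, PySem.Dict.get?, List.filter_map,
        List.map_map, Function.comp_def]
    have hfilter : c.keys.filter (fun cookie => c.getD cookie 0 == M)
        = (c.items.filter (fun p => p.2 == M)).map (fun p => p.1) := by
      rw [PySem.Dict.keys, List.filter_map]
      congr 1
      apply List.filter_congr
      intro p hp
      simp [Function.comp, pv_getD_of_mem_items c h p hp]
    simp only [hc] at hbne hgetD hfilter hMb ⊢
    simp only [List.isEmpty_cons, hbne, if_false, Bool.false_eq_true, hM,
      Option.getD_some, hMb, hgetD, hfilter]

-- ===== VERDICT (by name: the statement is the Claim_ definition above) =====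
theorem get_cookies_spec : Claim_equal_get_cookies := by
  intro lines date _ _
  unfold Spec_get_cookies get_cookies get_cookies_alt
  rw [pv_counts_eq]
  exact pv_extract_eq _ (pv_counts_nodup lines date)
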